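-- pv_equiv track=rewrite | github.com/genafox/Python | Labs/Lab1/Lab1.py | getDigitWords
-- ===== SOURCE A (Python) =====
-- def getDigitWords(text):
--     digitWords = {};
--     digitWord = '';
--     sum = 0;
--     for c in text:
--         if c.isdigit():
--             digitWord += c;
--             sum += int(c);
--         else:
--             if(len(digitWord) > 0):
--                 digitWords[digitWord] = sum;
--             digitWord = '';
--             sum = 0;
--     if(len(digitWord) > 0):
--         digitWords[digitWord] = sum;
--     return digitWords;
-- ===== SOURCE B (Python) =====
-- def getDigitWords(text):
--     # Two-pointer run scanner: find each maximal digit run directly and insert it,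
--     # instead of A's per-character buffer/flush state machine.
--     digitWords = {}
--     i, n = 0, len(text)
--     while i < n:
--         if text[i].isdigit():
--             j = i + 1
--             while j < n and text[j].isdigit():
--                 j += 1
--             run = text[i:j]
--             digitWords[run] = sum(int(c) for c in run)
--             i = j
--         else:
--             i += 1
--     return digitWords
-- ===== Notes on version B (the rewrite author's own statement) =====
-- stated objective: alternative
-- what changed: Replaces A's per-character buffer/flush state machine with a two-pointer scan that locates each maximal digit run directly, slices it out and inserts its digit sum.
import Mathlib
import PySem

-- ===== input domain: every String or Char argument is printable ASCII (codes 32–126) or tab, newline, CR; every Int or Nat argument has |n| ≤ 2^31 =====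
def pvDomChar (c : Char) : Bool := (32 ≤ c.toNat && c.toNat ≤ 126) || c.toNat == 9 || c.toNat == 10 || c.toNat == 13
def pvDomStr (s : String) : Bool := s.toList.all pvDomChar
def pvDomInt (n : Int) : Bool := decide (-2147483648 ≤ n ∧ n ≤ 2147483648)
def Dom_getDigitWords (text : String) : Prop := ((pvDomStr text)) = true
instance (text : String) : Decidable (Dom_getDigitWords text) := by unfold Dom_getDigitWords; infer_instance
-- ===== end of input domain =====

-- B replaces A's per-character buffer/flush state machine by a two-pointer scan over maximal
-- digit runs (objective: alternative decomposition, same cost).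

-- int(c) for an ASCII digit c (exact on the domain: isdigit on Dom chars holds only for '0'..'9')
def pvDigitVal (c : Char) : Int := (c.toNat : Int) - 48

-- ===== PORT A =====
def pvStepA (st : PySem.Dict String Int × List Char × Int) (c : Char) :
    PySem.Dict String Int × List Char × Int :=
  if PySem.Chars.isdigit c then
    (st.1, st.2.1 ++ [c], st.2.2 + pvDigitVal c)
  else
    (if st.2.1.length > 0 then st.1.insert (String.mk st.2.1) st.2.2 else st.1, [], 0)

def getDigitWords (text : String) : List (String × Int) :=
  let st := text.toList.foldl pvStepA (PySem.Dict.empty, [], 0)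
  (if st.2.1.length > 0 then st.1.insert (String.mk st.2.1) st.2.2 else st.1).items

-- ===== PORT B =====
-- the inner 'while j < n and text[j].isdigit(): j += 1' plus the slice text[i:j] is exactly
-- takeWhile/dropWhile of the digit predicate at position i
def pvGoB (cs : List Char) (d : PySem.Dict String Int) : PySem.Dict String Int :=
  match cs with
  | [] => d
  | c :: cs' =>
    if h : PySem.Chars.isdigit c then
      let run := (c :: cs').takeWhile PySem.Chars.isdigit
      pvGoB ((c :: cs').dropWhile PySem.Chars.isdigit)
        (d.insert (String.mk run) ((run.map pvDigitVal).sum))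
    else
      pvGoB cs' d
termination_by cs.length
decreasing_by
  · simp [h]
    exact List.length_dropWhile_le _ _
  · simp

def getDigitWords_alt (text : String) : List (String × Int) :=
  (pvGoB text.toList PySem.Dict.empty).items

-- ===== PRECONDITION & SPEC =====
def Spec_getDigitWords (text : String) (out : List (String × Int)) : Prop := out = getDigitWords_alt text
instance (text : String) (out : List (String × Int)) : Decidable (Spec_getDigitWords text out) := by unfold Spec_getDigitWords; infer_instance

-- ===== CLAIM (what is proved, stated in full; the proofs are below) =====
def Claim_equal_getDigitWords : Prop := ∀ (text : String), Dom_getDigitWords text → Spec_getDigitWords text (getDigitWords text)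

-- ===== LEMMAS AND PROOFS =====

-- A's final flush, as a function of the loop state
def pvFinishA (st : PySem.Dict String Int × List Char × Int) : PySem.Dict String Int :=
  if st.2.1.length > 0 then st.1.insert (String.mk st.2.1) st.2.2 else st.1

-- Main invariant: A's loop from an empty buffer equals B, and from a nonempty digit-run buffer
-- it equals B after closing the current run.
lemma pv_key : ∀ (n : Nat) (cs : List Char), cs.length ≤ n →
    (∀ d, pvFinishA (List.foldl pvStepA (d, [], 0) cs) = pvGoB cs d)
    ∧ (∀ d buf s, buf ≠ [] →
        pvFinishA (List.foldl pvStepA (d, buf, s) cs)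
          = pvGoB (cs.dropWhile PySem.Chars.isdigit)
              (d.insert (String.mk (buf ++ cs.takeWhile PySem.Chars.isdigit))
                (s + ((cs.takeWhile PySem.Chars.isdigit).map pvDigitVal).sum))) := by
  intro n
  induction n with
  | zero =>
    intro cs hcs
    have : cs = [] := List.length_eq_zero_iff.mp (Nat.le_zero.mp hcs)
    subst this
    constructor
    · intro d; simp [pvGoB, pvFinishA]
    · intro d buf s hbuf
      simp [pvGoB, pvFinishA, List.length_pos_iff.mpr hbuf]
  | succ n ih =>
    intro cs hcs
    match cs with
    | [] =>
      constructor
      · intro d; simp [pvGoB, pvFinishA]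
      · intro d buf s hbuf
        simp [pvGoB, pvFinishA, List.length_pos_iff.mpr hbuf]
    | c :: cs' =>
      have hlen : cs'.length ≤ n := Nat.lt_succ_iff.mp (by simpa using hcs)
      constructor
      · intro d
        by_cases h : PySem.Chars.isdigit c
        · have H := (ih cs' hlen).2 d [c] (pvDigitVal c) (by simp)
          rw [List.foldl_cons,
            show pvStepA (d, [], 0) c = (d, [c], pvDigitVal c) by simp [pvStepA, h],
            H, pvGoB]
          simp [h]
        · have H := (ih cs' hlen).1 d
          rw [List.foldl_cons,
            show pvStepA (d, [], 0) c = (d, [], 0) by simp [pvStepA, h],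
            H, pvGoB]
          simp [h]
      · intro d buf s hbuf
        by_cases h : PySem.Chars.isdigit c
        · have H := (ih cs' hlen).2 d (buf ++ [c]) (s + pvDigitVal c) (by simp)
          rw [List.foldl_cons,
            show pvStepA (d, buf, s) c = (d, buf ++ [c], s + pvDigitVal c) by
              simp [pvStepA, h],
            H]
          simp [h, add_assoc]
        · have H := (ih cs' hlen).1 (d.insert (String.mk buf) s)
          rw [List.foldl_cons,
            show pvStepA (d, buf, s) c = (d.insert (String.mk buf) s, [], 0) by
              simp [pvStepA, h, List.length_pos_iff.mpr hbuf],
            H]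
          simp [h]
          rw [pvGoB]
          simp [h]

-- ===== VERDICT (by name: the statement is the Claim_ definition above) =====
theorem getDigitWords_spec : Claim_equal_getDigitWords := by
  intro text _
  unfold Spec_getDigitWords getDigitWords getDigitWords_alt
  have := (pv_key text.toList.length text.toList le_rfl).1 PySem.Dict.empty
  rw [← this]
  rfl
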